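-- pv_equiv track=rewrite | github.com/AVJ20/VideoDubbing | src/metrics/runner.py | _voiced_bounds
-- ===== SOURCE A (Python) =====
-- from typing import Dict, List, Optional
--
-- def _voiced_bounds(frames: List[bool]) -> Dict[str, Optional[int]]:
--     """Return first/last voiced frame indices within the given frame list."""
--     if not frames:
--         return {"first": None, "last": None}
--     first = None
--     last = None
--     for i, v in enumerate(frames):
--         if v:
--             first = i
--             break
--     for i in range(len(frames) - 1, -1, -1):
--         if frames[i]:
--             last = i
--             break
--     return {"first": first, "last": last}
-- ===== SOURCE B (Python) =====
-- from typing import Dict, List, Optional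
--
-- def _voiced_bounds(frames: List[bool]) -> Dict[str, Optional[int]]:
--     """Return first/last voiced frame indices within the given frame list."""
--     first = None
--     last = None
--     for i, v in enumerate(frames):
--         if v:
--             if first is None:
--                 first = i
--             last = i
--     return {"first": first, "last": last}
-- ===== Notes on version B (the rewrite author's own statement) =====
-- stated objective: simpler
-- what changed: Replaces A's two opposite-direction early-exit scans (forward for first, backward by index for last) with one left-to-right pass maintaining both bounds.
import Mathlib
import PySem

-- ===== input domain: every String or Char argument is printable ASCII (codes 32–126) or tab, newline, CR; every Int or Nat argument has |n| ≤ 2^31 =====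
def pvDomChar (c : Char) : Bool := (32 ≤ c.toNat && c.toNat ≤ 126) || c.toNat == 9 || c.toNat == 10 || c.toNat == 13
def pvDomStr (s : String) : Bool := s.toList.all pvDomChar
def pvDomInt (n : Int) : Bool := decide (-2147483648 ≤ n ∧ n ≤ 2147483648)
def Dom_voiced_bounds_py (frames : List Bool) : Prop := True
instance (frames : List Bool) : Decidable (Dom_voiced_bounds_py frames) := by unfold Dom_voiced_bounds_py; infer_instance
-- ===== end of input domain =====

-- B replaces A's two opposite-direction early-exit scans with one forward pass maintaining both bounds (objective: simpler).


-- ===== PORT A =====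
-- first loop: 'for i, v in enumerate(frames): if v: first = i; break'
def firstLoopA : List Bool → Int → Option Int
  | [], _ => none
  | v :: t, i => if v then some i else firstLoopA t (i + 1)

-- second loop: 'for i in range(len(frames)-1, -1, -1): if frames[i]: last = i; break'
-- (counter counts the remaining indices; index checked is j when counter is j+1)
def lastLoopA (frames : List Bool) : Nat → Option Int
  | 0 => none
  | j + 1 =>
    match PySem.List.pyGet? frames (j : Int) with
    | some v => if v then some (j : Int) else lastLoopA frames j
    | none => none

def voiced_bounds_py (frames : List Bool) : List (String × Option Int) :=
  if frames = [] then [("first", none), ("last", none)]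
  else [("first", firstLoopA frames 0), ("last", lastLoopA frames frames.length)]

-- ===== PORT B =====
-- loop body of Source B: on each voiced frame set first (only if still None) and last
def stepB (acc : Option Int × Option Int) (p : Int × Bool) : Option Int × Option Int :=
  if p.2 then ((match acc.1 with | none => some p.1 | some f => some f), some p.1) else acc

def voiced_bounds_py_alt (frames : List Bool) : List (String × Option Int) :=
  let r := (PySem.List.enumerate frames 0).foldl stepB (none, none)
  [("first", r.1), ("last", r.2)]

-- ===== PRECONDITION & SPEC =====
def Spec_voiced_bounds_py (frames : List Bool) (out : List (String × Option Int)) : Prop := out = voiced_bounds_py_alt frames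
instance (frames : List Bool) (out : List (String × Option Int)) : Decidable (Spec_voiced_bounds_py frames out) := by unfold Spec_voiced_bounds_py; infer_instance

-- ===== CLAIM (what is proved, stated in full; the proofs are below) =====
def Claim_equal_voiced_bounds_py : Prop := ∀ (frames : List Bool), Dom_voiced_bounds_py frames → Spec_voiced_bounds_py frames (voiced_bounds_py frames)

-- ===== LEMMAS AND PROOFS =====

theorem firstLoopA_append (l : List Bool) (v : Bool) : ∀ i : Int,
    firstLoopA (l ++ [v]) i =
      match firstLoopA l i with
      | some j => some j
      | none => if v then some (i + l.length) else none := by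
  induction l with
  | nil => intro i; simp [firstLoopA]
  | cons h t ih =>
      intro i
      by_cases hv : h = true
      · simp [firstLoopA, hv]
      · simp only [Bool.not_eq_true] at hv
        simp only [List.cons_append, firstLoopA, hv, if_false, Bool.false_eq_true, ih (i + 1)]
        cases firstLoopA t (i + 1) with
        | none => simp [List.length_cons]; ring_nf
        | some j => simp

theorem lastLoopA_append_stable (l : List Bool) (v : Bool) : ∀ k : Nat, k ≤ l.length →
    lastLoopA (l ++ [v]) k = lastLoopA l k := by
  intro k
  induction k with
  | zero => intro _; simp [lastLoopA]
  | succ j ih =>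
      intro hk
      have hj : j < l.length := by omega
      have hget : PySem.List.pyGet? (l ++ [v]) (j : Int) = PySem.List.pyGet? l (j : Int) := by
        simp [PySem.List.pyGet?_natCast, List.getElem?_append_left hj]
      simp only [lastLoopA, hget, ih (by omega)]

theorem lastLoopA_append_top (l : List Bool) (v : Bool) :
    lastLoopA (l ++ [v]) (l.length + 1) =
      if v then some (l.length : Int) else lastLoopA l l.length := by
  have hget : PySem.List.pyGet? (l ++ [v]) ((l.length : Nat) : Int) = some v := by
    simpa using PySem.List.pyGet?_append_length (pre := l) (y := v) (ys := [])
  simp only [lastLoopA, hget, lastLoopA_append_stable l v l.length (le_refl _)]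

theorem foldB_append (l : List Bool) (v : Bool) (s : Option Int × Option Int) :
    (PySem.List.enumerate (l ++ [v]) 0).foldl stepB s =
      stepB ((PySem.List.enumerate l 0).foldl stepB s) ((l.length : Int), v) := by
  rw [PySem.List.enumerate_append]
  simp [List.foldl_append, PySem.List.enumerate_cons, PySem.List.enumerate_nil]

theorem fold_eq_loops (l : List Bool) :
    (PySem.List.enumerate l 0).foldl stepB (none, none) =
      (firstLoopA l 0, lastLoopA l l.length) := by
  induction l using List.reverseRecOn with
  | nil => simp [PySem.List.enumerate_nil, firstLoopA, lastLoopA]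
  | append_singleton l v ih =>
      rw [foldB_append, ih, List.length_append, List.length_singleton]
      rw [firstLoopA_append, lastLoopA_append_top]
      by_cases hv : v = true
      · cases hf : firstLoopA l 0 with
        | none => simp [stepB, hv, hf]
        | some j => simp [stepB, hv, hf]
      · simp only [Bool.not_eq_true] at hv
        simp [stepB, hv]
        cases firstLoopA l 0 <;> simp

-- ===== VERDICT (by name: the statement is the Claim_ definition above) =====
theorem voiced_bounds_py_spec : Claim_equal_voiced_bounds_py := by
  intro frames _
  unfold Spec_voiced_bounds_py voiced_bounds_py voiced_bounds_py_alt
  rw [fold_eq_loops]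
  by_cases h : frames = []
  · subst h; simp [firstLoopA, lastLoopA]
  · simp [h]
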